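-- pv_equiv track=rewrite | github.com/jk-jung/problem-solving | codewars/6kyu/6_The Train Problem.py | is_valid_train_arrangement
-- ===== SOURCE A (Python) =====
-- def is_valid_train_arrangement(a, b):
--     if len(a) != len(b):return False
--     if a.replace('.', '') != b.replace('.', ''): return False
--     aa = [i for i, x in enumerate(a) if x != '.']
--     bb = [i for i, x in enumerate(b) if x != '.']
--     for x, y, z in zip(a.replace('.', ''), aa, bb):
--         if x == '<' and y < z: return False
--         if x == '>' and y > z: return False
--     return True
-- ===== SOURCE B (Python) =====
-- def is_valid_train_arrangement(a, b):
--     # Online streaming matcher: one positional pass over both strings in lockstep.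
--     # Unmatched cars are buffered in queues qa/qb (at most one is nonempty) and each
--     # car is checked the moment its counterpart on the other side appears.
--     if len(a) != len(b):
--         return False
--     qa, qb = [], []
--     for p in range(len(a)):
--         x = a[p]
--         if x != '.':
--             if qb:
--                 ib, y = qb.pop(0)
--                 if x != y or (x == '<' and p < ib) or (x == '>' and p > ib):
--                     return False
--             else:
--                 qa.append((p, x))
--         y = b[p]
--         if y != '.':
--             if qa:
--                 ia, x = qa.pop(0)
--                 if x != y or (x == '<' and ia < p) or (x == '>' and ia > p):
--                     return False
--             else:
--                 qb.append((p, y))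
--     return not qa and not qb
-- ===== Notes on version B (the rewrite author's own statement) =====
-- stated objective: alternative
-- what changed: Replaced A's staged pipeline (two replace() copies compared for equality, two enumerate index comprehensions, then a zip loop over the stripped string) with an online streaming matcher: one positional pass over both strings in lockstep that buffers unmatched cars in two queues and checks char equality and the </> index constraints at the moment each car's counterpart appears, with no stripped-string comparison at all.
import Mathlib
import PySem

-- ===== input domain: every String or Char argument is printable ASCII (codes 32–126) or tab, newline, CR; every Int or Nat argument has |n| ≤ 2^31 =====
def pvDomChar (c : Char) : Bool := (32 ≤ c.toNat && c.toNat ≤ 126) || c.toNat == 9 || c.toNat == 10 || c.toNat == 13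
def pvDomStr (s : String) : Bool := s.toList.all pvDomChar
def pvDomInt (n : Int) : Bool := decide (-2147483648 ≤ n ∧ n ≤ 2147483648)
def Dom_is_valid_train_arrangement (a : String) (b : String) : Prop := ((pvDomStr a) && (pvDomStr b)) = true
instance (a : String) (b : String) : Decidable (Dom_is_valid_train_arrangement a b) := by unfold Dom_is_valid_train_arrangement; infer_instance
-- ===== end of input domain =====

-- B replaces A's staged pipeline (two replace() copies compared for equality, two
-- enumerate comprehensions, a zip loop) with an online streaming matcher: one
-- positional pass that buffers unmatched cars in queues and checks each car when
-- its counterpart appears; objective: alternative decomposition, same linear pass.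

-- ===== PORT A =====
-- for x, y, z in zip(...): if x=='<' and y<z: return False; if x=='>' and y>z: return False; return True
def pvALoop : List (Char × Int × Int) → Bool
  | [] => true
  | (x, y, z) :: t =>
    if x = '<' ∧ y < z then false
    else if x = '>' ∧ y > z then false
    else pvALoop t

def is_valid_train_arrangement (a : String) (b : String) : Bool :=
  if PySem.Str.len a ≠ PySem.Str.len b then false
  else if PySem.Str.replace a "." "" ≠ PySem.Str.replace b "." "" then false
  else
    -- aa = [i for i, x in enumerate(a) if x != '.'] , likewise bb
    let aa := (PySem.List.enumerate a.toList).foldl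
      (fun acc p => if p.2 ≠ '.' then acc ++ [p.1] else acc) []
    let bb := (PySem.List.enumerate b.toList).foldl
      (fun acc p => if p.2 ≠ '.' then acc ++ [p.1] else acc) []
    pvALoop ((PySem.Str.replace a "." "").toList.zip (aa.zip bb))

-- ===== PORT B =====
-- the body of B's 'for p in range(len(a))' loop: both char lists are walked in
-- lockstep (lengths are equal under the guard), p is the position, qa/qb the queues
-- of unmatched (index, char) cars; queue pop(0) is head/tail on a nonempty list.
def pvBGo : List Char → List Char → Int → List (Int × Char) → List (Int × Char) → Bool
  | [], _, _, qa, qb => qa.isEmpty && qb.isEmpty      -- loop done: return not qa and not qb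
  | _ :: _, [], _, _, _ => false                       -- unreachable: lengths are equal
  | x :: xs, y :: ys, p, qa, qb =>
    -- x = a[p]; if x != '.': match against qb's front or enqueue
    let s1 : Option (List (Int × Char) × List (Int × Char)) :=
      if x ≠ '.' then
        match qb with
        | (ib, cy) :: qb' =>
          if x ≠ cy ∨ (x = '<' ∧ p < ib) ∨ (x = '>' ∧ p > ib) then none
          else some (qa, qb')
        | [] => some (qa ++ [(p, x)], qb)
      else some (qa, qb)
    match s1 with
    | none => false
    | some (qa1, qb1) =>
      -- y = b[p]; if y != '.': match against qa's front or enqueue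
      let s2 : Option (List (Int × Char) × List (Int × Char)) :=
        if y ≠ '.' then
          match qa1 with
          | (ia, cx) :: qa' =>
            if cx ≠ y ∨ (cx = '<' ∧ ia < p) ∨ (cx = '>' ∧ ia > p) then none
            else some (qa', qb1)
          | [] => some (qa1, qb1 ++ [(p, y)])
        else some (qa1, qb1)
      match s2 with
      | none => false
      | some (qa2, qb2) => pvBGo xs ys (p + 1) qa2 qb2

def is_valid_train_arrangement_alt (a : String) (b : String) : Bool :=
  if PySem.Str.len a ≠ PySem.Str.len b then false
  else pvBGo a.toList b.toList 0 [] []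

-- ===== PRECONDITION & SPEC =====
def Spec_is_valid_train_arrangement (a : String) (b : String) (out : Bool) : Prop := out = is_valid_train_arrangement_alt a b
instance (a : String) (b : String) (out : Bool) : Decidable (Spec_is_valid_train_arrangement a b out) := by unfold Spec_is_valid_train_arrangement; infer_instance

-- ===== CLAIM (what is proved, stated in full; the proofs are below) =====
def Claim_equal_is_valid_train_arrangement : Prop := ∀ (a : String) (b : String), Dom_is_valid_train_arrangement a b → Spec_is_valid_train_arrangement a b (is_valid_train_arrangement a b)

-- ===== LEMMAS AND PROOFS =====

-- the (index, char) list of non-dot cars, the common abstraction of both programs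
def pvEf : List Char → Int → List (Int × Char)
  | [], _ => []
  | c :: t, i => if c = '.' then pvEf t (i + 1) else (i, c) :: pvEf t (i + 1)

-- the common check both programs compute on those lists
def pvCheck : List (Int × Char) → List (Int × Char) → Bool
  | [], [] => true
  | [], _ :: _ => false
  | _ :: _, [] => false
  | (i, x) :: p, (j, y) :: q =>
    if x ≠ y then false
    else if x = '<' ∧ i < j then false
    else if x = '>' ∧ i > j then false
    else pvCheck p q

theorem pvCheck_cons (i j : Int) (x y : Char) (P Q : List (Int × Char)) :
    pvCheck ((i, x) :: P) ((j, y) :: Q) =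
      if ¬x = y ∨ (x = '<' ∧ i < j) ∨ (x = '>' ∧ i > j) then false else pvCheck P Q := by
  simp only [pvCheck]
  split_ifs <;> tauto

theorem pvEf_map_snd : ∀ (l : List Char) (i : Int),
    (pvEf l i).map (·.2) = l.filter (fun c => c ≠ '.') := by
  intro l
  induction l with
  | nil => intro i; simp [pvEf]
  | cons c t ih =>
    intro i
    by_cases hc : c = '.'
    · subst hc; simp [pvEf, List.filter, ih]
    · simp [pvEf, hc, List.filter, ih]

theorem pvCheck_false_of_snd_ne : ∀ (p q : List (Int × Char)),
    p.map (·.2) ≠ q.map (·.2) → pvCheck p q = false := by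
  intro p
  induction p with
  | nil =>
    intro q h
    cases q with
    | nil => simp at h
    | cons y q => simp [pvCheck]
  | cons x p ih =>
    intro q h
    cases q with
    | nil => simp [pvCheck]
    | cons y q =>
      obtain ⟨i, cx⟩ := x
      obtain ⟨j, cy⟩ := y
      by_cases hc : cx = cy
      · subst hc
        simp only [pvCheck]
        have : p.map (·.2) ≠ q.map (·.2) := by
          intro he; apply h; simp [he]
        split_ifs <;> simp_all
      · simp [pvCheck, hc]

theorem pvALoop_zip_eq_check : ∀ (p q : List (Int × Char)),
    p.map (·.2) = q.map (·.2) →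
    pvALoop ((p.map (·.2)).zip ((p.map (·.1)).zip (q.map (·.1)))) = pvCheck p q := by
  intro p
  induction p with
  | nil =>
    intro q h
    have : q = [] := by cases q <;> simp_all
    subst this
    simp [pvALoop, pvCheck]
  | cons x p ih =>
    intro q h
    cases q with
    | nil => simp at h
    | cons y q =>
      obtain ⟨i, cx⟩ := x
      obtain ⟨j, cy⟩ := y
      simp only [List.map_cons, List.zip_cons_cons] at h ⊢
      have hcc : cx = cy := by simpa using congrArg (fun l => l.head?) h
      have htail : p.map (·.2) = q.map (·.2) := by simpa using congrArg (fun l => l.tail) h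
      subst hcc
      simp only [pvALoop, pvCheck]
      simp only [ne_eq, not_true_eq_false, if_false]
      split_ifs <;> simp_all

-- s.replace('.', '') strips the dots: Chars.replace with old = ['.'], new = []
theorem pvReplace_go_dot : ∀ (fuel : Nat) (l acc : List Char), l.length ≤ fuel →
    PySem.Chars.replace.go ['.'] [] fuel l acc = acc.reverse ++ l.filter (fun c => c ≠ '.') := by
  intro fuel
  induction fuel with
  | zero =>
    intro l acc h
    have : l = [] := by cases l <;> simp_all
    subst this
    simp [PySem.Chars.replace.go]
  | succ n ih =>
    intro l acc h
    cases l with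
    | nil => simp [PySem.Chars.replace.go]
    | cons c t =>
      by_cases hc : c = '.'
      · subst hc
        rw [PySem.Chars.replace.go]
        have hpre : List.isPrefixOf ['.'] ('.' :: t) = true := by
          cases t <;> simp [List.isPrefixOf]
        simp only [hpre, if_true, List.reverse_nil, List.nil_append]
        have hdrop : List.drop (['.'].length) ('.' :: t) = t := by simp
        rw [hdrop, ih t acc (by simp at h; omega)]
        simp [List.filter]
      · rw [PySem.Chars.replace.go]
        have hpre : List.isPrefixOf ['.'] (c :: t) = false := by
          simp [List.isPrefixOf]
          intro hh; exact absurd hh.symm hc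
        rw [hpre]
        simp only [Bool.false_eq_true, if_false]
        rw [ih t (c :: acc) (by simpa using Nat.le_of_succ_le_succ (by simpa using h))]
        simp [List.filter, hc]

theorem pvReplace_dot (s : String) :
    (PySem.Str.replace s "." "").toList = s.toList.filter (fun c => c ≠ '.') := by
  rw [PySem.Str.toList_replace]
  have hd : (".").toList = ['.'] := by decide
  have he : ("").toList = [] := by decide
  rw [hd, he]
  rw [PySem.Chars.replace]
  simp only [List.isEmpty_cons, if_false, Bool.false_eq_true]
  exact pvReplace_go_dot s.toList.length s.toList [] le_rfl

-- the enumerate-comprehension equals pvEf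
theorem pvEnum_filter_eq_ef : ∀ (l : List Char) (s : Int),
    (PySem.List.enumerate l s).filter (fun p => decide (p.2 ≠ '.')) = pvEf l s := by
  intro l
  induction l with
  | nil => intro s; simp [PySem.List.enumerate_nil, pvEf]
  | cons c t ih =>
    intro s
    rw [PySem.List.enumerate_cons]
    by_cases hc : c = '.'
    · subst hc; simpa [List.filter_cons, pvEf] using ih (s + 1)
    · simpa [List.filter_cons, hc, pvEf] using ih (s + 1)

theorem pvAA_eq (l : List Char) :
    (PySem.List.enumerate l).foldl (fun acc p => if p.2 ≠ '.' then acc ++ [p.1] else acc) []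
      = (pvEf l 0).map (·.1) := by
  rw [PySem.List.foldl_append_ite (fun q : Int × Char => q.2 ≠ '.') (fun q : Int × Char => q.1) (PySem.List.enumerate l) []]
  rw [pvEnum_filter_eq_ef]
  simp

-- B's streaming loop computes pvCheck of the pending queues followed by the
-- remaining cars, provided at most one queue is nonempty (the loop invariant)
theorem pvBGo_eq_check : ∀ (xs ys : List Char) (p : Int) (qa qb : List (Int × Char)),
    xs.length = ys.length → (qa = [] ∨ qb = []) →
    pvBGo xs ys p qa qb = pvCheck (qa ++ pvEf xs p) (qb ++ pvEf ys p) := by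
  intro xs
  induction xs with
  | nil =>
    intro ys p qa qb hlen hinv
    have hys : ys = [] := by cases ys <;> simp_all
    subst hys
    rcases hinv with h | h <;> subst h
    · rcases qb with _ | ⟨c, t⟩ <;> simp [pvBGo, pvEf, pvCheck]
    · rcases qa with _ | ⟨c, t⟩ <;> simp [pvBGo, pvEf, pvCheck]
  | cons x xs ih =>
    intro ys p qa qb hlen hinv
    cases ys with
    | nil => simp at hlen
    | cons y ys =>
      have hlen' : xs.length = ys.length := by simpa using hlen
      rw [pvBGo.eq_def]
      dsimp only
      by_cases hx : x = '.'
      · -- x is a dot: first half is a no-op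
        subst hx
        simp only [ne_eq, not_true_eq_false, if_false]
        by_cases hy : y = '.'
        · subst hy
          simp only [not_true_eq_false, if_false]
          rw [ih ys (p + 1) qa qb hlen' hinv]
          simp [pvEf]
        · simp only [hy, not_false_eq_true, if_true]
          rcases qa with _ | ⟨⟨ia, cx⟩, qa'⟩
          · -- enqueue (p, y) on qb
            dsimp only
            rw [ih ys (p + 1) [] (qb ++ [(p, y)]) hlen' (Or.inl rfl)]
            simp [pvEf, hy]
          · -- invariant: qb = []
            have hqb : qb = [] := hinv.resolve_left (by simp)
            subst hqb
            dsimp only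
            simp only [pvEf, if_neg hy, List.nil_append, List.cons_append]
            rw [pvCheck_cons]
            by_cases hcond : ¬cx = y ∨ (cx = '<' ∧ ia < p) ∨ (cx = '>' ∧ ia > p)
            · rw [if_pos hcond, if_pos hcond]
            · rw [if_neg hcond, if_neg hcond]
              dsimp only
              rw [ih ys (p + 1) qa' [] hlen' (Or.inr rfl)]
              simp
      · -- x is a car
        simp only [ne_eq, hx, not_false_eq_true, if_true]
        rcases qb with _ | ⟨⟨ib, cy⟩, qb'⟩
        · -- qb empty: enqueue (p, x) on qa, then handle y against qa ++ [(p, x)]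
          dsimp only
          by_cases hy : y = '.'
          · subst hy
            simp only [not_true_eq_false, if_false]
            rw [ih ys (p + 1) (qa ++ [(p, x)]) [] hlen' (Or.inr rfl)]
            simp [pvEf, hx]
          · simp only [hy, not_false_eq_true, if_true]
            rcases qa with _ | ⟨⟨ia, cx⟩, qa'⟩
            · -- fronts are (p, x) and (p, y)
              simp only [List.nil_append]
              simp only [pvEf, if_neg hx, if_neg hy]
              rw [pvCheck_cons]
              by_cases hcond : ¬x = y ∨ (x = '<' ∧ p < p) ∨ (x = '>' ∧ p > p)
              · rw [if_pos hcond, if_pos hcond]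
              · rw [if_neg hcond, if_neg hcond]
                dsimp only
                rw [ih ys (p + 1) [] [] hlen' (Or.inl rfl)]
                simp
            · -- invariant already gives qb = []; front of qa1 is (ia, cx)
              simp only [List.cons_append]
              simp only [pvEf, if_neg hx, if_neg hy, List.nil_append]
              rw [pvCheck_cons]
              by_cases hcond : ¬cx = y ∨ (cx = '<' ∧ ia < p) ∨ (cx = '>' ∧ ia > p)
              · rw [if_pos hcond, if_pos hcond]
              · rw [if_neg hcond, if_neg hcond]
                dsimp only
                rw [ih ys (p + 1) (qa' ++ [(p, x)]) [] hlen' (Or.inr rfl)]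
                simp
        · -- qb nonempty: invariant gives qa = []
          have hqa : qa = [] := hinv.resolve_right (by simp)
          subst hqa
          dsimp only
          simp only [pvEf, if_neg hx, List.nil_append, List.cons_append]
          rw [pvCheck_cons]
          by_cases hcond : ¬x = cy ∨ (x = '<' ∧ p < ib) ∨ (x = '>' ∧ p > ib)
          · rw [if_pos hcond, if_pos hcond]
          · rw [if_neg hcond, if_neg hcond]
            dsimp only
            -- matched; now handle y with qa1 = []
            by_cases hy : y = '.'
            · subst hy
              simp only [not_true_eq_false, if_false]
              rw [ih ys (p + 1) [] qb' hlen' (Or.inl rfl)]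
              simp
            · simp only [hy, not_false_eq_true, if_true]
              rw [ih ys (p + 1) [] (qb' ++ [(p, y)]) hlen' (Or.inl rfl)]
              simp

-- ===== VERDICT (by name: the statement is the Claim_ definition above) =====
theorem is_valid_train_arrangement_spec : Claim_equal_is_valid_train_arrangement := by
  intro a b _
  unfold Spec_is_valid_train_arrangement
  unfold is_valid_train_arrangement is_valid_train_arrangement_alt
  by_cases hlen : PySem.Str.len a = PySem.Str.len b
  · rw [if_neg (not_not_intro hlen), if_neg (not_not_intro hlen)]
    have hll : a.toList.length = b.toList.length := by
      simpa [PySem.Str.len_eq] using hlen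
    rw [pvBGo_eq_check a.toList b.toList 0 [] [] hll (Or.inl rfl)]
    simp only [List.nil_append]
    by_cases hrep : PySem.Str.replace a "." "" = PySem.Str.replace b "." ""
    · rw [if_neg (not_not_intro hrep)]
      have hsnd : (pvEf a.toList 0).map (·.2) = (pvEf b.toList 0).map (·.2) := by
        rw [pvEf_map_snd, pvEf_map_snd, ← pvReplace_dot, ← pvReplace_dot, hrep]
      show pvALoop _ = _
      rw [pvAA_eq, pvAA_eq]
      rw [show (PySem.Str.replace a "." "").toList = (pvEf a.toList 0).map (·.2) by
        rw [pvReplace_dot, pvEf_map_snd]]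
      rw [pvALoop_zip_eq_check _ _ hsnd]
    · rw [if_pos hrep]
      have hsnd : (pvEf a.toList 0).map (·.2) ≠ (pvEf b.toList 0).map (·.2) := by
        rw [pvEf_map_snd, pvEf_map_snd, ← pvReplace_dot, ← pvReplace_dot]
        intro he
        exact hrep (String.toList_inj.mp he)
      rw [pvCheck_false_of_snd_ne _ _ hsnd]
  · rw [if_pos hlen, if_pos hlen]
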